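-- pv_equiv track=rewrite | github.com/jwohlin2/CAD_Quoting_Tool | appkit/ui/planner_render.py | _planner_bucket_key_for_name
-- ===== SOURCE A (Python) =====
-- from typing import Any, Callable, TypedDict
--
-- def _planner_bucket_key_for_name(name: Any) -> str:
--     text = str(name or "").lower()
--     if not text:
--         return "milling"
--     if any(token in text for token in ("c'bore", "counterbore")):
--         return "counterbore"
--     if any(token in text for token in ("csk", "countersink")):
--         return "countersink"
--     if any(
--         token in text
--         for token in (
--             "tap",
--             "thread mill",
--             "thread_mill",
--             "rigid tap",
--             "rigid_tap",
--         )
--     ):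
--         return "tapping"
--     if any(token in text for token in ("drill", "ream", "bore")):
--         return "drilling"
--     if any(
--         token in text
--         for token in (
--             "grind",
--             "od grind",
--             "id grind",
--             "surface grind",
--             "jig grind",
--         )
--     ):
--         return "grinding"
--     if "wire" in text or "wedm" in text:
--         return "wire_edm"
--     if "edm" in text:
--         return "sinker_edm"
--     if any(token in text for token in ("saw", "waterjet")):
--         return "saw_waterjet"
--     if any(token in text for token in ("deburr", "finish")):
--         return "finishing_deburr"
--     if "inspect" in text or "cmm" in text or "fai" in text:
--         return "inspection"
--     return "milling"
-- ===== SOURCE B (Python) =====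
-- _TOKEN_PRIORITY = {
--     "c'bore": 0, "counterbore": 0,
--     "csk": 1, "countersink": 1,
--     "tap": 2, "thread mill": 2, "thread_mill": 2, "rigid tap": 2, "rigid_tap": 2,
--     "drill": 3, "ream": 3, "bore": 3,
--     "grind": 4,
--     "wire": 5, "wedm": 5,
--     "edm": 6,
--     "saw": 7, "waterjet": 7,
--     "deburr": 8, "finish": 8,
--     "inspect": 9, "cmm": 9, "fai": 9,
-- }
-- _BUCKETS = ("counterbore", "countersink", "tapping", "drilling", "grinding",
--             "wire_edm", "sinker_edm", "saw_waterjet", "finishing_deburr",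
--             "inspection", "milling")
--
--
-- def _planner_bucket_key_for_name(name):
--     text = str(name or "").lower()
--     best = len(_BUCKETS) - 1
--     for token, priority in _TOKEN_PRIORITY.items():
--         if priority < best and token in text:
--             best = priority
--     return _BUCKETS[best]
-- ===== Notes on version B (the rewrite author's own statement) =====
-- stated objective: alternative
-- what changed: Replaces the ordered first-match if/elif chain by a flat token-to-priority dict folded once with a min-priority accumulator and a bucket lookup table indexed by the winning priority; the five grind tokens collapse to their common substring and the empty-string early return disappears.
import Mathlib
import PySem

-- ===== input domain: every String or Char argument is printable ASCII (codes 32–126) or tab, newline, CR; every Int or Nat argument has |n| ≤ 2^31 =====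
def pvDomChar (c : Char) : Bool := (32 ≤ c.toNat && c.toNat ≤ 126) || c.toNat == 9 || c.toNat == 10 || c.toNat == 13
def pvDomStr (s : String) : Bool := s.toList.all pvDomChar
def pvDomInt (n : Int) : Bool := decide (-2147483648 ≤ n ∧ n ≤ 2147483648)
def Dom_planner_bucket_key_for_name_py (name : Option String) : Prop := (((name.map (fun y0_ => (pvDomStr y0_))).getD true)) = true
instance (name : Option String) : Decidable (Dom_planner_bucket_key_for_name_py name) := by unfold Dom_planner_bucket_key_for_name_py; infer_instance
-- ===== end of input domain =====

-- B replaces A's ordered if/elif first-match chain by a flat token→priority map folded once with a min-priority accumulator, then indexes a bucket table — an accumulator pass instead of control-flow ordering; same return values.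

-- ===== PORT A =====
-- `str(name or "").lower()`: `name or ""` maps None to "" and leaves any string unchanged ("" stays ""), so it is `name.getD ""`.
def planner_bucket_key_for_name_py (name : Option String) : String :=
  let text := PySem.Str.lower (name.getD "")
  if text.toList = [] then "milling"
  else if (["c'bore", "counterbore"]).any (fun t => PySem.Str.isIn t text) then "counterbore"
  else if (["csk", "countersink"]).any (fun t => PySem.Str.isIn t text) then "countersink"
  else if (["tap", "thread mill", "thread_mill", "rigid tap", "rigid_tap"]).any (fun t => PySem.Str.isIn t text) then "tapping"
  else if (["drill", "ream", "bore"]).any (fun t => PySem.Str.isIn t text) then "drilling"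
  else if (["grind", "od grind", "id grind", "surface grind", "jig grind"]).any (fun t => PySem.Str.isIn t text) then "grinding"
  else if PySem.Str.isIn "wire" text || PySem.Str.isIn "wedm" text then "wire_edm"
  else if PySem.Str.isIn "edm" text then "sinker_edm"
  else if (["saw", "waterjet"]).any (fun t => PySem.Str.isIn t text) then "saw_waterjet"
  else if (["deburr", "finish"]).any (fun t => PySem.Str.isIn t text) then "finishing_deburr"
  else if PySem.Str.isIn "inspect" text || PySem.Str.isIn "cmm" text || PySem.Str.isIn "fai" text then "inspection"
  else "milling"

-- ===== PORT B =====
-- Source B's dict _TOKEN_PRIORITY, in insertion order, as an association list.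
def pvTokenPriority : List (String × Nat) :=
  [ ("c'bore", 0), ("counterbore", 0),
    ("csk", 1), ("countersink", 1),
    ("tap", 2), ("thread mill", 2), ("thread_mill", 2), ("rigid tap", 2), ("rigid_tap", 2),
    ("drill", 3), ("ream", 3), ("bore", 3),
    ("grind", 4),
    ("wire", 5), ("wedm", 5),
    ("edm", 6),
    ("saw", 7), ("waterjet", 7),
    ("deburr", 8), ("finish", 8),
    ("inspect", 9), ("cmm", 9), ("fai", 9) ]

def pvBuckets : List String :=
  ["counterbore", "countersink", "tapping", "drilling", "grinding",
   "wire_edm", "sinker_edm", "saw_waterjet", "finishing_deburr",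
   "inspection", "milling"]

def planner_bucket_key_for_name_py_alt (name : Option String) : String :=
  let text := PySem.Str.lower (name.getD "")
  let best := pvTokenPriority.foldl
    (fun best tp => if tp.2 < best && PySem.Str.isIn tp.1 text then tp.2 else best)
    (pvBuckets.length - 1)
  -- `_BUCKETS[best]`: best ≤ 10 = len(_BUCKETS)-1 always (the fold never increases it), so the index is in range.
  pvBuckets.getD best "milling"

-- ===== PRECONDITION & SPEC =====
def Spec_planner_bucket_key_for_name_py (name : Option String) (out : String) : Prop := out = planner_bucket_key_for_name_py_alt name
instance (name : Option String) (out : String) : Decidable (Spec_planner_bucket_key_for_name_py name out) := by unfold Spec_planner_bucket_key_for_name_py; infer_instance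

-- ===== CLAIM (what is proved, stated in full; the proofs are below) =====
def Claim_equal_planner_bucket_key_for_name_py : Prop := ∀ (name : Option String), Dom_planner_bucket_key_for_name_py name → Spec_planner_bucket_key_for_name_py name (planner_bucket_key_for_name_py name)

-- ===== LEMMAS AND PROOFS =====

-- If a token `sub` is absent from `text`, every longer token containing `sub` is absent too.
theorem pv_isIn_mono {sub big text : String} (hinf : sub.toList <:+: big.toList)
    (h : PySem.Str.isIn sub text = false) : PySem.Str.isIn big text = false := by
  rw [PySem.Str.isIn_eq, PySem.Chars.isIn_eq_false_iff] at h ⊢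
  exact fun hb => h (hinf.trans hb)

-- No nonempty token is a substring of the empty text.
theorem pv_isIn_nil {sub text : String} (ht : text.toList = []) (hs : sub.toList ≠ []) :
    PySem.Str.isIn sub text = false := by
  rw [PySem.Str.isIn_eq, PySem.Chars.isIn_eq_false_iff, ht]
  intro hinf
  exact hs (List.eq_nil_of_infix_nil hinf)

-- One fold step of B equals "take the min with the token's priority if it matches".
theorem pv_step_eq (text : String) (b p : Nat) (t : String) :
    (if p < b && PySem.Str.isIn t text then p else b)
      = if PySem.Str.isIn t text then min b p else b := by
  by_cases h : PySem.Str.isIn t text = true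
  · simp only [h, Bool.and_true, if_true]
    rw [Nat.min_def]
    split_ifs <;> simp only [decide_eq_true_eq] at * <;> omega
  · have h' : PySem.Str.isIn t text = false := Bool.eq_false_iff.mpr h
    simp only [h', Bool.and_false, Bool.false_eq_true, if_false]

-- B's fold over a constant-priority token group computes min with that priority iff some token matches.
theorem pv_group_fold (text : String) (p : Nat) (toks : List String) (b : Nat) :
    (toks.map (fun t => (t, p))).foldl
        (fun best tp => if tp.2 < best && PySem.Str.isIn tp.1 text then tp.2 else best) b
      = if toks.any (fun t => PySem.Str.isIn t text) then min b p else b := by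
  induction toks generalizing b with
  | nil => simp
  | cons t ts ih =>
    simp only [List.map_cons, List.foldl_cons, List.any_cons]
    rw [pv_step_eq, ih]
    by_cases h : PySem.Str.isIn t text = true
    · simp only [h, if_true, Bool.true_or]
      by_cases h2 : (ts.any fun t => PySem.Str.isIn t text) = true
      · simp only [h2, if_true, Nat.min_assoc, Nat.min_self]
      · simp only [Bool.eq_false_iff.mpr h2, Bool.false_eq_true, if_false]
    · have h' : PySem.Str.isIn t text = false := Bool.eq_false_iff.mpr h
      simp only [h', Bool.false_eq_true, if_false, Bool.false_or]

-- ===== VERDICT (by name: the statement is the Claim_ definition above) =====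
theorem planner_bucket_key_for_name_py_spec : Claim_equal_planner_bucket_key_for_name_py := by
  intro name _
  unfold Spec_planner_bucket_key_for_name_py planner_bucket_key_for_name_py planner_bucket_key_for_name_py_alt
  set text := PySem.Str.lower (name.getD "") with htext
  clear_value text
  have hsplit : pvTokenPriority =
      (["c'bore", "counterbore"].map (fun t => (t, 0))) ++
      (["csk", "countersink"].map (fun t => (t, 1))) ++
      (["tap", "thread mill", "thread_mill", "rigid tap", "rigid_tap"].map (fun t => (t, 2))) ++
      (["drill", "ream", "bore"].map (fun t => (t, 3))) ++
      (["grind"].map (fun t => (t, 4))) ++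
      (["wire", "wedm"].map (fun t => (t, 5))) ++
      (["edm"].map (fun t => (t, 6))) ++
      (["saw", "waterjet"].map (fun t => (t, 7))) ++
      (["deburr", "finish"].map (fun t => (t, 8))) ++
      (["inspect", "cmm", "fai"].map (fun t => (t, 9))) := by rfl
  rw [hsplit]
  simp only [List.foldl_append]
  rw [pv_group_fold, pv_group_fold, pv_group_fold, pv_group_fold, pv_group_fold,
      pv_group_fold, pv_group_fold, pv_group_fold, pv_group_fold, pv_group_fold]
  simp only [List.any_cons, List.any_nil, Bool.or_false, Bool.or_assoc]
  by_cases hnil : text.toList = []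
  · have hall : ∀ sub : String, sub.toList ≠ [] → PySem.Str.isIn sub text = false :=
      fun sub hs => pv_isIn_nil hnil hs
    simp only [hnil, if_true]
    rw [hall "c'bore" (by decide), hall "counterbore" (by decide), hall "csk" (by decide),
        hall "countersink" (by decide), hall "tap" (by decide), hall "thread mill" (by decide),
        hall "thread_mill" (by decide), hall "rigid tap" (by decide), hall "rigid_tap" (by decide),
        hall "drill" (by decide), hall "ream" (by decide), hall "bore" (by decide),
        hall "grind" (by decide), hall "wire" (by decide), hall "wedm" (by decide),
        hall "edm" (by decide), hall "saw" (by decide), hall "waterjet" (by decide),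
        hall "deburr" (by decide), hall "finish" (by decide), hall "inspect" (by decide),
        hall "cmm" (by decide), hall "fai" (by decide)]
    decide
  · simp only [hnil, if_false]
    -- collapse A's grind group to the single token "grind"
    have hgrind : (PySem.Str.isIn "grind" text || (PySem.Str.isIn "od grind" text ||
        (PySem.Str.isIn "id grind" text || (PySem.Str.isIn "surface grind" text ||
          PySem.Str.isIn "jig grind" text)))) = PySem.Str.isIn "grind" text := by
      by_cases hg : PySem.Str.isIn "grind" text = true
      · simp only [hg, Bool.true_or]
      · have hg' : PySem.Str.isIn "grind" text = false := Bool.eq_false_iff.mpr hg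
        rw [hg', pv_isIn_mono (sub := "grind") (big := "od grind") (by decide) hg',
            pv_isIn_mono (sub := "grind") (big := "id grind") (by decide) hg',
            pv_isIn_mono (sub := "grind") (big := "surface grind") (by decide) hg',
            pv_isIn_mono (sub := "grind") (big := "jig grind") (by decide) hg']
        rfl
    rw [hgrind]
    generalize (PySem.Str.isIn "c'bore" text || PySem.Str.isIn "counterbore" text) = b1
    generalize (PySem.Str.isIn "csk" text || PySem.Str.isIn "countersink" text) = b2
    generalize (PySem.Str.isIn "tap" text || (PySem.Str.isIn "thread mill" text ||
      (PySem.Str.isIn "thread_mill" text || (PySem.Str.isIn "rigid tap" text ||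
        PySem.Str.isIn "rigid_tap" text)))) = b3
    generalize (PySem.Str.isIn "drill" text || (PySem.Str.isIn "ream" text ||
      PySem.Str.isIn "bore" text)) = b4
    generalize (PySem.Str.isIn "grind" text) = b5
    generalize (PySem.Str.isIn "wire" text || PySem.Str.isIn "wedm" text) = b6
    generalize (PySem.Str.isIn "edm" text) = b7
    generalize (PySem.Str.isIn "saw" text || PySem.Str.isIn "waterjet" text) = b8
    generalize (PySem.Str.isIn "deburr" text || PySem.Str.isIn "finish" text) = b9
    generalize (PySem.Str.isIn "inspect" text || (PySem.Str.isIn "cmm" text ||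
      PySem.Str.isIn "fai" text)) = b10
    revert b1 b2 b3 b4 b5 b6 b7 b8 b9 b10
    decide
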